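-- pv_equiv track=rewrite | github.com/GetKlai/klai | klai-knowledge-ingest/knowledge_ingest/fingerprint.py | _sample_tokens
-- ===== SOURCE A (Python) =====
-- import string
--
-- _SIMHASH_BITS = 64
--
-- def _sample_tokens(text: str) -> list[str]:
--     """Split text into filtered alphanumeric tokens (mirrors trafilatura.sample_tokens)."""
--     tokens = []
--     for token in text.split():
--         token = token.strip(string.punctuation)
--         if token.isalnum():
--             tokens.append(token)
--     # Progressively lower min-length threshold to get ≥ 32 tokens
--     for min_len in range(4, -1, -1):
--         sample = [t for t in tokens if len(t) > min_len]
--         if len(sample) >= _SIMHASH_BITS // 2: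
--             return sample
--     return [t for t in tokens if len(t) > 0]
-- ===== SOURCE B (Python) =====
-- import string
--
-- _SIMHASH_BITS = 64
--
-- def _sample_tokens(text: str) -> list[str]:
--     """One pass of threshold counters instead of up to five rescans of the token list."""
--     tokens = [t for t in (w.strip(string.punctuation) for w in text.split())
--               if t.isalnum()]
--     g1 = g2 = g3 = g4 = 0
--     for t in tokens:
--         L = len(t)
--         if L > 1:
--             g1 += 1
--         if L > 2:
--             g2 += 1
--         if L > 3:
--             g3 += 1
--         if L > 4:
--             g4 += 1
--     if g4 >= 32:
--         m = 4
--     elif g3 >= 32: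
--         m = 3
--     elif g2 >= 32:
--         m = 2
--     elif g1 >= 32:
--         m = 1
--     else:
--         # every kept token is alphanumeric, hence non-empty, so threshold 0 keeps all
--         return tokens
--     return [t for t in tokens if len(t) > m]
-- ===== Notes on version B (the rewrite author's own statement) =====
-- stated objective: alternative
-- what changed: A rescans the token list for each threshold 4..0 building a sample list per threshold with early return; B makes one counting pass maintaining four threshold counters, picks the threshold from the counts, and builds the result list exactly once (using that alnum tokens are non-empty, so threshold 0 keeps everything).
import Mathlib
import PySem

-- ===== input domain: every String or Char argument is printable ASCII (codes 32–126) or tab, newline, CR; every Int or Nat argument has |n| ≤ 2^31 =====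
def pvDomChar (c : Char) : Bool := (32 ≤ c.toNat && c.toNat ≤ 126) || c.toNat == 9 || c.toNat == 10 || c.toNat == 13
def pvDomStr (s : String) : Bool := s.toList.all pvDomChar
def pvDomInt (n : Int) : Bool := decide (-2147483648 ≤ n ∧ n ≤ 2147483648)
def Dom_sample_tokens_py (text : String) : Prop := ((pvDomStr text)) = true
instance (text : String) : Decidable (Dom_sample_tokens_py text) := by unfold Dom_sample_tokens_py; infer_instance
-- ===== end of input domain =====

-- B replaces A's up-to-five rescans of the token list by one counting pass plus one final build (alternative decomposition, same asymptotic cost).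

-- string.punctuation
def pvPunct : String := "!\"#$%&'()*+,-./:;<=>?@[\\]^_`{|}~"

-- ===== PORT A =====
-- the 'for min_len in range(4,-1,-1)' loop with its early return, over the remaining range
def pvPickA (tokens : List String) : List Int → List String
  | [] => tokens.filter (fun t => decide ((0 : Int) < PySem.Str.len t))
  | m :: ms =>
      let sample := tokens.filter (fun t => decide (m < PySem.Str.len t))
      if PySem.Int.floordiv 64 2 ≤ (sample.length : Int) then sample else pvPickA tokens ms

def sample_tokens_py (text : String) : List String :=
  let tokens := (PySem.Str.split₀ text).foldl (fun acc w =>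
      let t := PySem.Str.stripChars w pvPunct
      if PySem.Str.strIsalnum t then acc ++ [t] else acc) []
  pvPickA tokens (PySem.List.pyRange 4 (-1) (-1))

-- ===== PORT B =====
def sample_tokens_py_alt (text : String) : List String :=
  let tokens := ((PySem.Str.split₀ text).map (fun w => PySem.Str.stripChars w pvPunct)).filter
      (fun t => PySem.Str.strIsalnum t)
  let g := tokens.foldl (fun (g : Nat × Nat × Nat × Nat) t =>
      let L := PySem.Str.len t
      ((if 1 < L then g.1 + 1 else g.1),
       (if 2 < L then g.2.1 + 1 else g.2.1),
       (if 3 < L then g.2.2.1 + 1 else g.2.2.1),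
       (if 4 < L then g.2.2.2 + 1 else g.2.2.2))) (0, 0, 0, 0)
  let m? : Option Int :=
    if 32 ≤ g.2.2.2 then some 4
    else if 32 ≤ g.2.2.1 then some 3
    else if 32 ≤ g.2.1 then some 2
    else if 32 ≤ g.1 then some 1
    else none
  match m? with
  | none => tokens
  | some m => tokens.filter (fun t => decide (m < PySem.Str.len t))

-- ===== PRECONDITION & SPEC =====
def Spec_sample_tokens_py (text : String) (out : List String) : Prop := out = sample_tokens_py_alt text
instance (text : String) (out : List String) : Decidable (Spec_sample_tokens_py text out) := by unfold Spec_sample_tokens_py; infer_instance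

-- ===== CLAIM (what is proved, stated in full; the proofs are below) =====
def Claim_equal_sample_tokens_py : Prop := ∀ (text : String), Dom_sample_tokens_py text → Spec_sample_tokens_py text (sample_tokens_py text)

-- ===== LEMMAS AND PROOFS =====

-- both sides build the same token list
lemma pvTokens_eq (text : String) :
    (PySem.Str.split₀ text).foldl (fun acc w =>
      let t := PySem.Str.stripChars w pvPunct
      if PySem.Str.strIsalnum t then acc ++ [t] else acc) [] =
    ((PySem.Str.split₀ text).map (fun w => PySem.Str.stripChars w pvPunct)).filter
      (fun t => PySem.Str.strIsalnum t) := by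
  rw [PySem.List.foldl_append_if (fun w => PySem.Str.strIsalnum (PySem.Str.stripChars w pvPunct))
      (fun w => PySem.Str.stripChars w pvPunct)]
  simp [List.filter_map, Function.comp_def]

-- the one-pass counters are the countP's of the four threshold predicates
lemma pvCounters_eq (tokens : List String) (a b c d : Nat) :
    tokens.foldl (fun (g : Nat × Nat × Nat × Nat) t =>
      ((if (1 : Int) < PySem.Str.len t then g.1 + 1 else g.1),
       (if (2 : Int) < PySem.Str.len t then g.2.1 + 1 else g.2.1),
       (if (3 : Int) < PySem.Str.len t then g.2.2.1 + 1 else g.2.2.1),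
       (if (4 : Int) < PySem.Str.len t then g.2.2.2 + 1 else g.2.2.2))) (a, b, c, d) =
    (a + tokens.countP (fun t => decide ((1 : Int) < PySem.Str.len t)),
     b + tokens.countP (fun t => decide ((2 : Int) < PySem.Str.len t)),
     c + tokens.countP (fun t => decide ((3 : Int) < PySem.Str.len t)),
     d + tokens.countP (fun t => decide ((4 : Int) < PySem.Str.len t))) := by
  induction tokens generalizing a b c d with
  | nil => simp
  | cons t ts ih =>
      simp only [List.foldl_cons]
      rw [ih]
      simp only [Prod.mk.injEq, List.countP_cons, decide_eq_true_eq]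
      refine ⟨?_, ?_, ?_, ?_⟩ <;> split_ifs <;> omega

-- alnum tokens are non-empty, so the length-0 threshold keeps everything
lemma pvFilter_pos (tokens : List String)
    (h : ∀ t ∈ tokens, PySem.Str.strIsalnum t = true) :
    tokens.filter (fun t => decide ((0 : Int) < PySem.Str.len t)) = tokens := by
  apply List.filter_eq_self.2
  intro t ht
  have h := h t ht
  simp only [PySem.Str.strIsalnum, PySem.Chars.strIsalnum, Bool.and_eq_true,
    Bool.not_eq_true', List.isEmpty_eq_false_iff] at h
  have hlen : 0 < t.toList.length := List.length_pos_iff.2 h.1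
  simp only [decide_eq_true_iff, PySem.Str.len]
  exact_mod_cast hlen

-- '64 // 2 ≤ len(sample)' is '32 ≤ countP'
lemma pvCount_ge (tokens : List String) (p : String → Bool) :
    (PySem.Int.floordiv 64 2 ≤ ((tokens.filter p).length : Int)) ↔ 32 ≤ tokens.countP p := by
  rw [List.countP_eq_length_filter]
  have h32 : PySem.Int.floordiv 64 2 = 32 := by decide
  rw [h32]
  exact_mod_cast Iff.rfl

-- ===== VERDICT (by name: the statement is the Claim_ definition above) =====
theorem sample_tokens_py_spec : Claim_equal_sample_tokens_py := by
  intro text _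
  unfold Spec_sample_tokens_py sample_tokens_py sample_tokens_py_alt
  dsimp only
  rw [pvTokens_eq, (by decide : PySem.List.pyRange 4 (-1) (-1) = [4, 3, 2, 1, 0])]
  generalize hT : ((PySem.Str.split₀ text).map (fun w => PySem.Str.stripChars w pvPunct)).filter
      (fun t => PySem.Str.strIsalnum t) = T
  have halnum : ∀ t ∈ T, PySem.Str.strIsalnum t = true := by
    intro t ht
    rw [← hT] at ht
    exact List.of_mem_filter ht
  rw [pvCounters_eq]
  simp only [Nat.zero_add]
  simp only [pvPickA]
  by_cases h4 : 32 ≤ T.countP (fun t => decide ((4 : Int) < PySem.Str.len t))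
  · rw [if_pos ((pvCount_ge T _).2 h4), if_pos h4]
  · rw [if_neg (fun hc => h4 ((pvCount_ge T _).1 hc)), if_neg h4]
    by_cases h3 : 32 ≤ T.countP (fun t => decide ((3 : Int) < PySem.Str.len t))
    · rw [if_pos ((pvCount_ge T _).2 h3), if_pos h3]
    · rw [if_neg (fun hc => h3 ((pvCount_ge T _).1 hc)), if_neg h3]
      by_cases h2 : 32 ≤ T.countP (fun t => decide ((2 : Int) < PySem.Str.len t))
      · rw [if_pos ((pvCount_ge T _).2 h2), if_pos h2]
      · rw [if_neg (fun hc => h2 ((pvCount_ge T _).1 hc)), if_neg h2]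
        by_cases h1 : 32 ≤ T.countP (fun t => decide ((1 : Int) < PySem.Str.len t))
        · rw [if_pos ((pvCount_ge T _).2 h1), if_pos h1]
        · rw [if_neg (fun hc => h1 ((pvCount_ge T _).1 hc)), if_neg h1]
          split
          · exact pvFilter_pos T halnum
          · exact pvFilter_pos T halnum
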